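-- pv_equiv track=rewrite | github.com/alexandraback/datacollection | solutions_5688567749672960_1/Python/Martial/a.py | solve
-- ===== SOURCE A (Python) =====
-- def solve(n):
--     if n<=19:
--         return n
--     res = 10
--     for i in range(1,20):
--         if n == 10 ** i:
--             return res
--         res += 10 ** ((i+1)//2)
--         res += -1
--         res += 10 ** ((i+1)//2 + (i+1)%2)
--
--     if n % 10 == 0:
--         return solve(n-1)+1
--
--     digits = list(str(n))
--     nd = len(digits)
--     tmp = solve(10 ** (nd-1))
--     res = tmp + n - 10 ** (nd-1)
--
--     h = nd // 2
--     s = digits[:h]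
--     s.reverse()
--     a = int(''.join(s))
--     b = int(''.join(digits[h:]))
--     res = min(res, tmp + a+b)
--     return res
-- ===== SOURCE B (Python) =====
-- def solve(n):
--     if n <= 19:
--         return n
--     # digit count and leading power of ten, arithmetically (no str, no scan of 19 powers)
--     nd, p = 1, 1
--     while 10 * p <= n:
--         p *= 10
--         nd += 1
--     # closed form for the value at p = 10**(nd-1): summing A's recurrence in pairs gives,
--     # with nd-1 = 2*q+1:  10 + 130*(10**q - 1)//9 - 2*q
--     # with nd-1 = 2*q>0:  10 + (31*10**q - 130)//9 - (2*q - 1)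
--     q, r = divmod(nd - 1, 2)
--     if r == 1:
--         tmp = 10 + 130 * (10 ** q - 1) // 9 - 2 * q
--     elif q == 0:
--         tmp = 10
--     else:
--         tmp = 10 + (31 * 10 ** q - 130) // 9 - (2 * q - 1)
--     if n == p:
--         return tmp
--     # a trailing 0 costs one extra step; step down once instead of recursing
--     k = 1 if n % 10 == 0 else 0
--     m = n - k
--     if m <= 19:
--         return m + k
--     ds = str(m)
--     h = nd // 2
--     a = int(ds[::-1][nd - h:])
--     b = int(ds[h:])
--     return tmp + min(m - p, a + b) + k
-- ===== Notes on version B (the rewrite author's own statement) =====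
-- stated objective: alternative
-- what changed: B replaces A's fixed-length scan over powers of ten and its recursion (on the leading power of ten and on n-1 for trailing zeros) by an arithmetic while-loop digit count, a closed-form constant-time formula for the base value obtained by summing A's recurrence in pairs, a one-step offset k for a trailing zero, and digit reversal via one whole-string reverse; no table, no recursion, no scan.
import Mathlib
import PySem

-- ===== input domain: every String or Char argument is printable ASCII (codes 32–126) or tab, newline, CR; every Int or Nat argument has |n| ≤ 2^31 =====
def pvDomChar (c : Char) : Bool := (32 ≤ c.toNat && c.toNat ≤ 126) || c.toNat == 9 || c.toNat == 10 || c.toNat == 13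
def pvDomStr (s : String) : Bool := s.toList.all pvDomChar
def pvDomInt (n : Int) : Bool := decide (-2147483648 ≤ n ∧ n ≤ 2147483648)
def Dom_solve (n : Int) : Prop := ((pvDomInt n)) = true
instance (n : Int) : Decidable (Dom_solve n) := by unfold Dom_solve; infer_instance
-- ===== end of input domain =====

-- B replaces A's power-of-ten scan and double recursion by an arithmetic digit-count loop,
-- a closed-form base-value formula and a one-step trailing-zero offset; same return values.


-- ===== PORT A =====
-- the `for i in range(1,20)` loop with its early `return res`: `some res` = early return, `none` = fall-through
-- exponents (i+1)//2 etc. are nonnegative for i ∈ range(1,20), so `.toNat` on them is exact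
def solveLoopA (n : Int) : List Int → Int → Option Int
  | [], _ => none
  | i :: rest, res =>
      if n = 10 ^ (i.toNat) then some res
      else solveLoopA n rest
        (res + 10 ^ (PySem.Int.floordiv (i + 1) 2).toNat - 1
             + 10 ^ (PySem.Int.floordiv (i + 1) 2 + PySem.Int.mod (i + 1) 2).toNat)

-- fuel-guarded transliteration of A (the guard only makes the recursion total; A's recursion
-- depth is at most 3, so the fuel 3 given below is never exhausted where the claim applies)
def solveGoA : Nat → Int → Int
  | 0, _ => 0
  | fuel + 1, n =>
    if n ≤ 19 then n
    else
      match solveLoopA n (PySem.List.pyRange 1 20 1) 10 with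
      | some r => r
      | none =>
        if PySem.Int.mod n 10 = 0 then solveGoA fuel (n - 1) + 1
        else
          let digits := (PySem.Int.toStr n).toList          -- list(str(n))
          let nd := digits.length
          let tmp := solveGoA fuel (10 ^ (nd - 1))
          let res := tmp + n - 10 ^ (nd - 1)
          let h := nd / 2
          let s := (PySem.List.slice digits none (some (h : Int))).reverse
          -- int(''.join(s)) : joining a list of single chars is the char list itself, so int() is ofChars?
          let a := (PySem.Int.ofChars? s).getD 0
          let b := (PySem.Int.ofChars? (PySem.List.slice digits (some (h : Int)) none)).getD 0
          min res (tmp + a + b)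

def solve (n : Int) : Int := solveGoA 3 n

-- ===== PORT B =====
-- while 10 * p <= n: p *= 10; nd += 1   (the fuel argument only makes the loop total;
-- it is never exhausted: for every n the loop stops once 10^nd exceeds n, within 40 steps on Dom)
def countLoopB : Nat → Int → Int → Nat → Int × Nat
  | 0, _, p, nd => (p, nd)
  | fuel + 1, n, p, nd => if 10 * p ≤ n then countLoopB fuel n (10 * p) (nd + 1) else (p, nd)

-- closed form for the base value at 10**(nd-1): Source B's q, r = divmod(nd-1, 2) branch
def baseVal (nd : Nat) : Int :=
  let q := (nd - 1) / 2
  if (nd - 1) % 2 = 1 then 10 + PySem.Int.floordiv (130 * (10 ^ q - 1)) 9 - 2 * (q : Int)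
  else if q = 0 then 10
  else 10 + PySem.Int.floordiv (31 * 10 ^ q - 130) 9 - (2 * (q : Int) - 1)

def solve_alt (n : Int) : Int :=
  if n ≤ 19 then n
  else
    let pr := countLoopB 40 n 1 1
    let p := pr.1
    let nd := pr.2
    let tmp := baseVal nd
    if n = p then tmp
    else
      let k : Int := if PySem.Int.mod n 10 = 0 then 1 else 0
      let m := n - k
      if m ≤ 19 then m + k
      else
        let ds := (PySem.Int.toStr m).toList                 -- str(m)
        let h := nd / 2
        -- ds[::-1][nd-h:] : whole-string reverse, then drop nd-h
        let a := (PySem.Int.ofChars? (PySem.List.slice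
                    ((PySem.List.slice? ds none none (-1)).getD [])
                    (some ((nd - h : Nat) : Int)) none)).getD 0
        let b := (PySem.Int.ofChars? (PySem.List.slice ds (some ((h : Nat) : Int)) none)).getD 0
        tmp + min (m - p) (a + b) + k

-- ===== PRECONDITION & SPEC =====
def Spec_solve (n : Int) (out : Int) : Prop := out = solve_alt n
instance (n : Int) (out : Int) : Decidable (Spec_solve n out) := by unfold Spec_solve; infer_instance

-- ===== CLAIM (what is proved, stated in full; the proofs are below) =====
def Claim_equal_solve : Prop := ∀ (n : Int), Dom_solve n → Spec_solve n (solve n)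

-- ===== LEMMAS AND PROOFS =====

theorem core_len_pos (b f m : Nat) (hf : 0 < f) : 1 ≤ (Nat.toDigitsCore b f m []).length := by
  obtain ⟨f', rfl⟩ : ∃ f', f = f' + 1 := ⟨f - 1, by omega⟩
  rw [Nat.toDigitsCore]
  split
  · simp
  · rw [Nat.toDigitsCore_lens_eq]; omega

theorem len_chars_ub (n : Int) (h0 : 0 ≤ n) (h1 : n ≤ 2147483648) :
    ((PySem.Int.toStr n).toList).length ≤ 10 := by
  rw [PySem.Int.toList_toStr, PySem.Int.toChars, if_neg (by omega)]
  exact Nat.toDigits_length 10 n.toNat 10 (by norm_num) (by omega)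

theorem len_chars_lb (n : Int) (h : 20 ≤ n) :
    2 ≤ ((PySem.Int.toStr n).toList).length := by
  rw [PySem.Int.toList_toStr, PySem.Int.toChars, if_neg (by omega)]
  have h10 : ¬ (n.toNat / 10 = 0) := by omega
  rw [Nat.toDigits, Nat.toDigitsCore]
  rw [if_neg h10, Nat.toDigitsCore_lens_eq]
  have := core_len_pos 10 n.toNat (n.toNat / 10) (by omega)
  omega

-- exact power-of-ten bounds from the digit-string length
theorem pow_len_bounds (n : Int) (h : 20 ≤ n) (hub : n ≤ 2147483648) :
    10 ^ (((PySem.Int.toStr n).toList).length - 1) ≤ n ∧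
    n < 10 ^ ((PySem.Int.toStr n).toList).length := by
  have hlb := len_chars_lb n h
  rw [PySem.Int.toList_toStr, PySem.Int.toChars, if_neg (by omega)] at *
  set L := (Nat.toDigits 10 n.toNat).length with hL
  have hup : n.toNat < 10 ^ L :=
    (Nat.length_toDigits_le_iff (by norm_num) (by omega)).mp (le_refl L)
  have hlo : ¬ n.toNat < 10 ^ (L - 1) := by
    intro hc
    have := (Nat.length_toDigits_le_iff (b := 10) (n := n.toNat) (k := L - 1)
      (by norm_num) (by omega)).mpr hc
    omega
  constructor
  · have : (10 : Int) ^ (L - 1) = ((10 ^ (L - 1) : Nat) : Int) := by push_cast; ring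
    omega
  · have : (10 : Int) ^ L = ((10 ^ L : Nat) : Int) := by push_cast; ring
    omega

theorem loopA_none_aux (n : Int) : ∀ (l : List Int) (res : Int),
    (∀ i ∈ l, n ≠ 10 ^ i.toNat) → solveLoopA n l res = none := by
  intro l
  induction l with
  | nil => intro res _; rfl
  | cons i rest ih =>
      intro res h
      rw [solveLoopA, if_neg (h i (by simp))]
      exact ih _ (fun j hj => h j (by simp [hj]))

theorem loopA_none (n : Int) (hlb : 19 < n) (hub : n ≤ 2147483648)
    (hp : ¬ (n = 100 ∨ n = 1000 ∨ n = 10000 ∨ n = 100000 ∨ n = 1000000 ∨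
             n = 10000000 ∨ n = 100000000 ∨ n = 1000000000)) :
    solveLoopA n (PySem.List.pyRange 1 20 1) 10 = none := by
  push_neg at hp
  obtain ⟨h2,h3,h4,h5,h6,h7,h8,h9⟩ := hp
  apply loopA_none_aux
  intro i hi
  rw [show PySem.List.pyRange (1:Int) 20 1 = [1,2,3,4,5,6,7,8,9,10,11,12,13,14,15,16,17,18,19]
      from by decide] at hi
  fin_cases hi <;>
    simp only [show ∀ m : Nat, Int.toNat (OfNat.ofNat m) = OfNat.ofNat m from fun _ => rfl] <;>
    norm_num <;> omega

-- the digit-count loop of B lands exactly on (10^d, d+1) when 10^d ≤ n < 10^(d+1)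
theorem countLoopB_spec : ∀ (fuel j d : Nat) (n : Int), j ≤ d → d ≤ fuel + j →
    10 ^ d ≤ n → n < 10 ^ (d + 1) →
    countLoopB fuel n (10 ^ j) (j + 1) = (10 ^ d, d + 1) := by
  intro fuel
  induction fuel with
  | zero =>
      intro j d n hjd hd _ _
      have : j = d := by omega
      subst this
      rfl
  | succ fuel ih =>
      intro j d n hjd hd hlo hup
      rw [countLoopB]
      by_cases hc : 10 * (10 : Int) ^ j ≤ n
      · rw [if_pos hc]
        have hj1 : (10 : Int) ^ (j + 1) ≤ n := by rw [pow_succ]; linarith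
        have hjd1 : j + 1 ≤ d := by
          by_contra hcon
          have : j = d := by omega
          subst this
          omega
        have := ih (j + 1) d n hjd1 (by omega) hlo hup
        rw [show 10 * (10 : Int) ^ j = 10 ^ (j + 1) from by rw [pow_succ]; ring] at *
        exact this
      · rw [if_neg hc]
        have hj1 : n < (10 : Int) ^ (j + 1) := by rw [pow_succ]; push_neg at hc; linarith
        have : d ≤ j := by
          by_contra hcon
          have hle : (10 : Int) ^ (j + 1) ≤ 10 ^ d := pow_le_pow_right₀ (by norm_num) (by omega)
          omega
        have : j = d := by omega
        subst this
        rfl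

-- A's recursive base value solveGoA (10^k) equals B's closed-form baseVal (k+1), k = 1..9
theorem tmp_eq (f : Nat) (hf : 0 < f) (k : Nat) (h1 : 1 ≤ k) (h9 : k ≤ 9) :
    solveGoA f (10 ^ k) = baseVal (k + 1) := by
  obtain ⟨f, rfl⟩ : ∃ f', f = f' + 1 := ⟨f - 1, by omega⟩
  interval_cases k
  · rw [solveGoA]; norm_num; decide
  · rw [solveGoA]
    norm_num [show solveLoopA 100 (PySem.List.pyRange 1 20 1) 10 = some 29 from by decide]
    decide
  · rw [solveGoA]
    norm_num [show solveLoopA 1000 (PySem.List.pyRange 1 20 1) 10 = some 138 from by decide]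
    decide
  · rw [solveGoA]
    norm_num [show solveLoopA 10000 (PySem.List.pyRange 1 20 1) 10 = some 337 from by decide]
    decide
  · rw [solveGoA]
    norm_num [show solveLoopA 100000 (PySem.List.pyRange 1 20 1) 10 = some 1436 from by decide]
    decide
  · rw [solveGoA]
    norm_num [show solveLoopA 1000000 (PySem.List.pyRange 1 20 1) 10 = some 3435 from by decide]
    decide
  · rw [solveGoA]
    norm_num [show solveLoopA 10000000 (PySem.List.pyRange 1 20 1) 10 = some 14434 from by decide]
    decide
  · rw [solveGoA]
    norm_num [show solveLoopA 100000000 (PySem.List.pyRange 1 20 1) 10 = some 34433 from by decide]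
    decide
  · rw [solveGoA]
    norm_num [show solveLoopA 1000000000 (PySem.List.pyRange 1 20 1) 10 = some 144432 from by decide]
    decide

-- B's reversed slice ds[::-1][nd-h:] is A's reversed first half ds[:h] reversed
theorem rev_slice_eq (ds : List Char) (nd h : Nat) (hlen : ds.length = nd) (hh : h ≤ nd) :
    PySem.List.slice ((PySem.List.slice? ds none none (-1)).getD [])
      (some ((nd - h : Nat) : Int)) none
    = (PySem.List.slice ds none (some ((h : Nat) : Int))).reverse := by
  rw [PySem.List.slice?_none_none_neg_one]
  rw [Option.getD_some]
  rw [PySem.List.slice_from_natCast, PySem.List.slice_to_natCast]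
  rw [List.drop_reverse, hlen]
  rw [show nd - (nd - h) = h from by omega]

theorem solve_spec_aux : ∀ (n : Int), Dom_solve n → solve n = solve_alt n := by
  intro n hDom
  have hb : -2147483648 ≤ n ∧ n ≤ 2147483648 := by
    simpa [Dom_solve, pvDomInt] using hDom
  by_cases h19 : n ≤ 19
  · simp [solve, solveGoA, solve_alt, h19]
  · push_neg at h19
    by_cases hpow : n = 100 ∨ n = 1000 ∨ n = 10000 ∨ n = 100000 ∨ n = 1000000 ∨
                    n = 10000000 ∨ n = 100000000 ∨ n = 1000000000
    · rcases hpow with rfl|rfl|rfl|rfl|rfl|rfl|rfl|rfl <;> decide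
    · have hloop := loopA_none n h19 hb.2 hpow
      have hlb := len_chars_lb n (by omega)
      have hub := len_chars_ub n (by omega) hb.2
      have hbounds := pow_len_bounds n (by omega) hb.2
      set L := ((PySem.Int.toStr n).toList).length with hLdef
      have hloopB : countLoopB 40 n 1 1 = (10 ^ (L - 1), L) := by
        have := countLoopB_spec 40 0 (L - 1) n (by omega) (by omega)
          hbounds.1 (by rw [show L - 1 + 1 = L from by omega]; exact hbounds.2)
        simpa [show L - 1 + 1 = L from by omega] using this
      push_neg at hpow
      obtain ⟨q2,q3,q4,q5,q6,q7,q8,q9⟩ := hpow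
      -- B's power-of-ten test n = p is false
      have hBpow : n ≠ 10 ^ (L - 1) := by
        intro hEq
        have hp1 : 1 ≤ L - 1 := by omega
        have hp9 : L - 1 ≤ 9 := by omega
        set p := L - 1
        interval_cases p <;> norm_num at hEq <;> omega
      have hmodeq : PySem.Int.mod n 10 = n % 10 := PySem.Int.mod_eq_emod_of_pos (by omega)
      by_cases hm : PySem.Int.mod n 10 = 0
      · -- multiple of ten: A does solve(n-1)+1, B uses the offset k = 1
        have hm' : n % 10 = 0 := by rw [← hmodeq]; exact hm
        by_cases h20 : n = 20
        · subst h20; decide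
        · have h30 : 30 ≤ n := by omega
          -- n-1 has the same digit count L (n is not a power of ten)
          have hnpow : 10 ^ (L - 1) < n := lt_of_le_of_ne hbounds.1 (Ne.symm hBpow)
          have hlb' := len_chars_lb (n - 1) (by omega)
          have hub' := len_chars_ub (n - 1) (by omega) (by omega)
          have hbounds' := pow_len_bounds (n - 1) (by omega) (by omega)
          set L' := ((PySem.Int.toStr (n - 1)).toList).length with hL'def
          have hLL : L' = L := by
            by_contra hne
            rcases Nat.lt_or_ge L' L with hlt | hge
            · have : (10 : Int) ^ (L - 1) ≥ 10 ^ L' :=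
                pow_le_pow_right₀ (by norm_num) (by omega)
              omega
            · have hgt : L ≤ L' - 1 := by omega
              have : (10 : Int) ^ L ≤ 10 ^ (L' - 1) :=
                pow_le_pow_right₀ (by norm_num) (by omega)
              omega
          have hloop' : solveLoopA (n - 1) (PySem.List.pyRange 1 20 1) 10 = none :=
            loopA_none (n - 1) (by omega) (by omega) (by omega)
          have hm1 : PySem.Int.mod (n - 1) 10 ≠ 0 := by
            rw [PySem.Int.mod_eq_emod_of_pos (by omega : (0:Int) < 10)]; omega
          rw [solve, solveGoA]
          rw [if_neg (by omega), hloop]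
          simp only [if_pos hm]
          rw [solveGoA, if_neg (by omega), hloop']
          simp only [if_neg hm1]
          rw [solve_alt, if_neg (by omega)]
          simp only [hloopB]
          rw [if_neg hBpow]
          simp only [if_pos hm]
          rw [if_neg (by omega : ¬ (n - 1 ≤ 19))]
          rw [show ((PySem.Int.toStr (n - 1)).toList).length = L from by
            rw [← hL'def]; exact hLL]
          rw [tmp_eq 1 (by norm_num) (L - 1) (by omega) (by omega)]
          rw [rev_slice_eq ((PySem.Int.toStr (n - 1)).toList) L (L / 2)
            (by rw [← hL'def]; exact hLL) (by omega)]
          rw [show L - 1 + 1 = L from by omega]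
          omega
      · -- not a multiple of ten: both take the digit branch directly (k = 0)
        rw [solve, solveGoA]
        rw [if_neg (by omega), hloop]
        simp only [if_neg hm]
        rw [solve_alt, if_neg (by omega)]
        simp only [hloopB]
        rw [if_neg hBpow]
        simp only [if_neg hm]
        rw [show n - 0 = n from by ring]
        rw [if_neg (by omega : ¬ (n ≤ 19))]
        rw [show ((PySem.Int.toStr n).toList).length = L from hLdef.symm]
        rw [tmp_eq 2 (by norm_num) (L - 1) (by omega) (by omega)]
        rw [rev_slice_eq ((PySem.Int.toStr n).toList) L (L / 2) hLdef.symm (by omega)]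
        rw [show L - 1 + 1 = L from by omega]
        omega

-- ===== VERDICT (by name: the statement is the Claim_ definition above) =====
theorem solve_spec : Claim_equal_solve := by
  intro n h
  exact solve_spec_aux n h
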